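-- pv_equiv track=rewrite | github.com/caiovillani/protocolo-SM-extrema-2026 | src/context_engine/pdf_utils.py | convert_to_markdown_table
-- ===== SOURCE A (Python) =====
-- from typing import Any, Dict, List, Optional, Tuple
--
-- def convert_to_markdown_table(table_data: List[List[Any]]) -> str:
--     """Converte matriz de dados para tabela markdown.
--
--     Args:
--         table_data: Lista de listas (linhas × colunas)
--
--     Returns:
--         String com tabela em formato markdown
--     """
--     if not table_data or len(table_data) == 0:
--         return ""
--
--     # Limpar células None e normalizar
--     cleaned_data = []
--     for row in table_data:
--         cleaned_row = [str(cell or "").strip() for cell in row]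
--         cleaned_data.append(cleaned_row)
--
--     # Primeira linha como header
--     if len(cleaned_data) == 0:
--         return ""
--
--     header = cleaned_data[0]
--     body = cleaned_data[1:] if len(cleaned_data) > 1 else []
--
--     # Calcular largura de colunas
--     col_widths = [len(h) for h in header]
--     for row in body:
--         for i, cell in enumerate(row):
--             if i < len(col_widths):
--                 col_widths[i] = max(col_widths[i], len(cell))
--
--     # Gerar linhas markdown
--     lines = []
--
--     # Header
--     header_line = "| " + " | ".join(h.ljust(w) for h, w in zip(header, col_widths)) + " |"
--     lines.append(header_line)
--
--     # Separator
--     separator = "|" + "|".join("-" * (w + 2) for w in col_widths) + "|"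
--     lines.append(separator)
--
--     # Body
--     for row in body:
--         # Pad row if needed
--         padded_row = row + [""] * (len(header) - len(row))
--         row_line = "| " + " | ".join(cell.ljust(w) for cell, w in zip(padded_row, col_widths)) + " |"
--         lines.append(row_line)
--
--     return "\n".join(lines)
-- ===== SOURCE B (Python) =====
-- from typing import Any, List
--
--
-- def convert_to_markdown_table(table_data: List[List[Any]]) -> str:
--     """Converte matriz para tabela markdown, construida coluna a coluna e transposta."""
--     if not table_data or not table_data[0]:
--         return ""
--     cols = []
--     for i in range(len(table_data[0])):
--         cells = [str((row[i] if i < len(row) else None) or "").strip()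
--                  for row in table_data]
--         w = max(map(len, cells))
--         pieces = [" " + c.ljust(w) + " " for c in cells]
--         cols.append([pieces[0], "-" * (w + 2)] + pieces[1:])
--     return "\n".join("|" + "|".join(line) + "|" for line in zip(*cols))
-- ===== Notes on version B (the rewrite author's own statement) =====
-- stated objective: alternative
-- what changed: B builds the table column by column - for each column it gathers the cells, computes the width and pre-renders every cell (and the separator dash run) as a finished ' cell ' piece - then transposes the list of rendered columns with zip(*cols) and joins each transposed line with '|'; A instead scans row-major maintaining a width list and formats line by line at emit time.
-- intended difference: On inputs whose first row is the empty list, A returns degenerate junk lines like '| |\n||' (an artifact of joining zero columns), while B returns '' as for an empty table, which is the intended value for a table with no columns. — e.g. on convert_to_markdown_table([[]]): A returns "| |\n||", B returns ""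
import Mathlib
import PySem

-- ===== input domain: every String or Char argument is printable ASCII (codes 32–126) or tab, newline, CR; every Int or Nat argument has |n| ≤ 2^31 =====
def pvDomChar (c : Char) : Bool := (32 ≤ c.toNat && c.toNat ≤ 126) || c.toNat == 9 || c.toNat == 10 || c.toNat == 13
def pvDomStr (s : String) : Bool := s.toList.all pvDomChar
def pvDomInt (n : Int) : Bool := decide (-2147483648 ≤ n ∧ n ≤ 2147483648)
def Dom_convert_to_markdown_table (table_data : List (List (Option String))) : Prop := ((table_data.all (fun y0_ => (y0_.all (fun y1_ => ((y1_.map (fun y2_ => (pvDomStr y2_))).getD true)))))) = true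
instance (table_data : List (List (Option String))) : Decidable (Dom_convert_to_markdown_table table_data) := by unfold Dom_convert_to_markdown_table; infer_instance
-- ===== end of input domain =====

-- B builds the table column by column (cells, width and rendered ' cell ' pieces per column,
-- separator piece included) and transposes with zip(*cols); A scans row-major keeping a width
-- list and formats each line at emit time. On a non-empty input whose first row is empty, B
-- returns "" where A returns degenerate junk lines (see D_ below).

-- ===== PORT A =====
-- shared port of Python's str.ljust (pad right with spaces to width w; exact)
def pvLjust (cs : List Char) (w : Int) : List Char :=
  cs ++ List.replicate (w - PySem.Chars.len cs).toNat ' '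

-- body of A's inner width-update loop: `if i < len(col_widths): col_widths[i] = max(...)`
def pvStepA (ws : List Int) (p : Int × List Char) : List Int :=
  if p.1 < PySem.List.len ws then
    PySem.List.pySetD ws p.1 (max (PySem.List.pyGetD ws p.1 0) (PySem.Chars.len p.2))
  else ws

-- A's `for i, cell in enumerate(row): ...`
def pvUpdA (ws : List Int) (row : List (List Char)) : List Int :=
  (PySem.List.enumerate row 0).foldl pvStepA ws

def convert_to_markdown_table (table_data : List (List (Option String))) : String :=
  if table_data = [] then "" else
  let cleaned_data := table_data.map (fun row =>
    row.map (fun cell => PySem.Chars.strip (cell.getD "").toList))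
  match cleaned_data with
  | [] => ""
  | header :: body =>
    let col_widths := body.foldl pvUpdA (header.map (fun h => PySem.Chars.len h))
    let header_line := ['|', ' '] ++ PySem.Chars.join [' ', '|', ' ']
        ((header.zip col_widths).map (fun hw => pvLjust hw.1 hw.2)) ++ [' ', '|']
    let separator := ['|'] ++ PySem.Chars.join ['|']
        (col_widths.map (fun w => List.replicate (w + 2).toNat '-')) ++ ['|']
    let body_lines := body.map (fun row =>
      let padded_row := row ++ List.replicate (header.length - row.length) ([] : List Char)
      ['|', ' '] ++ PySem.Chars.join [' ', '|', ' ']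
        ((padded_row.zip col_widths).map (fun cw => pvLjust cw.1 cw.2)) ++ [' ', '|'])
    String.ofList (PySem.Chars.join ['\n'] ([header_line, separator] ++ body_lines))

-- ===== PORT B =====
-- B's per-column cell: `str((row[i] if i < len(row) else None) or "").strip()`
def pvCellB (i : Nat) (row : List (Option String)) : List Char :=
  if (i : Int) < PySem.List.len row then
    PySem.Chars.strip ((row.getD i none).getD "").toList
  else []

-- B's column i: all cells of the column, its width, its rendered pieces, separator piece spliced in
def pvColB (td : List (List (Option String))) (i : Nat) : List (List Char) :=
  let cells := td.map (pvCellB i)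
  let w := (PySem.List.max? (cells.map PySem.Chars.len) id).getD 0  -- max(map(len, cells)); cells ≠ [] in every call
  let pieces := cells.map (fun c => [' '] ++ pvLjust c w ++ [' '])
  pieces.headD [] :: List.replicate (w + 2).toNat '-' :: pieces.tail

-- hand port of Python's zip(*cols), step for step (exact: stops at the first exhausted column)
def pvHeads? {α : Type} (cols : List (List α)) : Option (List α × List (List α)) :=
  cols.foldr (fun c acc => match c, acc with
    | x :: xs, some (hs, ts) => some (x :: hs, xs :: ts)
    | _, _ => none) (some ([], []))

def pvZipStarAux {α : Type} : List α → List (List α) → List (List α)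
  | [], _ => []
  | x :: xs, cs =>
    match pvHeads? cs with
    | some (hs, ts) => (x :: hs) :: pvZipStarAux xs ts
    | none => []

def pvZipStar {α : Type} : List (List α) → List (List α)
  | [] => []
  | c :: cs => pvZipStarAux c cs

def convert_to_markdown_table_alt (table_data : List (List (Option String))) : String :=
  if table_data = [] ∨ table_data.headD [] = [] then "" else
  let cols := (List.range (table_data.headD []).length).map (pvColB table_data)
  String.ofList (PySem.Chars.join ['\n']
    ((pvZipStar cols).map (fun line => ['|'] ++ PySem.Chars.join ['|'] line ++ ['|'])))

-- ===== PRECONDITION & SPEC =====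
-- On inputs whose first row is the empty list, A returns degenerate junk lines like "|  |\n||"
-- (an artifact of joining zero columns), while B returns "" as for an empty table, the intended
-- value for a table with no columns.
def D_convert_to_markdown_table (table_data : List (List (Option String))) : Prop :=
  table_data ≠ [] ∧ table_data.headD [] = []
instance (table_data : List (List (Option String))) : Decidable (D_convert_to_markdown_table table_data) := by unfold D_convert_to_markdown_table; infer_instance

def Spec_convert_to_markdown_table (table_data : List (List (Option String))) (out : String) : Prop := ¬ D_convert_to_markdown_table table_data → out = convert_to_markdown_table_alt table_data
instance (table_data : List (List (Option String))) (out : String) : Decidable (Spec_convert_to_markdown_table table_data out) := by unfold Spec_convert_to_markdown_table; infer_instance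

def pvDiffWitness_convert_to_markdown_table : List (List (Option String)) := [[]]
def pvDiffWitnessOut_convert_to_markdown_table : String × String := ("|  |\n||", "")

-- ===== CLAIM (what is proved, stated in full; the proofs are below) =====
def Claim_unchanged_convert_to_markdown_table : Prop := ∀ (table_data : List (List (Option String))), Dom_convert_to_markdown_table table_data → Spec_convert_to_markdown_table table_data (convert_to_markdown_table table_data)
def Claim_changed_convert_to_markdown_table : Prop := Dom_convert_to_markdown_table (pvDiffWitness_convert_to_markdown_table) ∧ D_convert_to_markdown_table (pvDiffWitness_convert_to_markdown_table) ∧ convert_to_markdown_table (pvDiffWitness_convert_to_markdown_table) = pvDiffWitnessOut_convert_to_markdown_table.1 ∧ convert_to_markdown_table_alt (pvDiffWitness_convert_to_markdown_table) = pvDiffWitnessOut_convert_to_markdown_table.2 ∧ pvDiffWitnessOut_convert_to_markdown_table.1 ≠ pvDiffWitnessOut_convert_to_markdown_table.2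
def Claim_exact_convert_to_markdown_table : Prop := ∀ (table_data : List (List (Option String))), Dom_convert_to_markdown_table table_data → D_convert_to_markdown_table table_data → convert_to_markdown_table table_data ≠ convert_to_markdown_table_alt table_data

-- ===== LEMMAS AND PROOFS =====

-- ---- A-side: A's row-major width fold characterised column-wise ----

-- B's row normalizer used only in the proofs: `(r + [""] * n)[:n]`
def pvPadB (n : Nat) (r : List (List Char)) : List (List Char) :=
  (r ++ List.replicate n ([] : List Char)).take n

theorem pvPadB_length (n : Nat) (r : List (List Char)) : (pvPadB n r).length = n := by
  simp [pvPadB]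

theorem pvPadB_of_length_eq (r : List (List Char)) : pvPadB r.length r = r := by
  simp [pvPadB]

theorem zip_take_left {α β : Type} (l : List α) (w : List β) :
    List.zip l w = List.zip (l.take w.length) w := by
  induction l generalizing w with
  | nil => simp
  | cons a l ih =>
    cases w with
    | nil => simp
    | cons b w => simp [List.zip_cons_cons, ih]

theorem pad_take (row : List (List Char)) (n : Nat) :
    (row ++ List.replicate (n - row.length) ([] : List Char)).take n = pvPadB n row := by
  apply List.ext_getElem
  · simp [pvPadB]; omega
  · intro i h1 h2
    by_cases hr : i < row.length
    · simp [pvPadB, List.getElem_take, hr]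
    · simp [pvPadB, List.getElem_take, List.getElem_append, hr]

theorem max?_cons_int (x : Int) (xs : List Int) :
    PySem.List.max? (x :: xs) id = some (xs.foldl max x) := by
  induction xs generalizing x with
  | nil => rfl
  | cons y ys ih =>
    have hstep : PySem.List.max? (x :: y :: ys) id = PySem.List.max? (max x y :: ys) id := by
      simp only [PySem.List.max?, List.foldl_cons]
      congr 1
      show (if (id x : Int) < id y then some y else some x) = some (max x y)
      simp only [id_eq]
      by_cases h : x < y
      · rw [if_pos h, max_eq_right (le_of_lt h)]
      · rw [if_neg h, max_eq_left (by omega)]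
    rw [hstep, ih, List.foldl_cons]

theorem chars_len_nonneg (c : List Char) : 0 ≤ PySem.Chars.len c := by
  simp [PySem.Chars.len]

theorem take_append_replicate (r : List (List Char)) (k m : Nat) (h : m ≤ r.length + k) :
    (r ++ List.replicate k ([] : List Char)).take m = (r ++ List.replicate m []).take m := by
  apply List.ext_getElem
  · simp; omega
  · intro i h1 h2
    by_cases hr : i < r.length
    · simp [List.getElem_take, hr]
    · simp [List.getElem_take, List.getElem_append, hr]

theorem pvPadB_nil (m : Nat) : pvPadB m [] = List.replicate m ([] : List Char) := by
  simp [pvPadB]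

theorem pvPadB_cons (m : Nat) (hm : 0 < m) (c : List Char) (r : List (List Char)) :
    pvPadB m (c :: r) = c :: pvPadB (m - 1) r := by
  unfold pvPadB
  obtain ⟨m', rfl⟩ : ∃ m', m = m' + 1 := ⟨m - 1, by omega⟩
  simp only [List.cons_append, List.take_succ_cons, Nat.add_sub_cancel]
  rw [take_append_replicate r (m' + 1) m' (by omega)]

theorem zipWith_max_replicate (l : List Int) (hnn : ∀ x ∈ l, 0 ≤ x) :
    l.zipWith (fun w c => max w (PySem.Chars.len c)) (List.replicate l.length ([] : List Char)) = l := by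
  induction l with
  | nil => rfl
  | cons a l ih =>
    simp only [List.length_cons, List.replicate_succ, List.zipWith_cons_cons]
    rw [ih (fun x hx => hnn x (List.mem_cons_of_mem _ hx))]
    have : max a (PySem.Chars.len []) = a := by
      have := hnn a (List.mem_cons_self)
      simp [PySem.Chars.len]; omega
    rw [this]

theorem pvUpdA_enum (row : List (List Char)) : ∀ (s : Nat) (ws : List Int), (∀ x ∈ ws, 0 ≤ x) →
    (PySem.List.enumerate row (s : Int)).foldl pvStepA ws
      = ws.take s ++ (ws.drop s).zipWith (fun w c => max w (PySem.Chars.len c))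
          (pvPadB (ws.length - s) row) := by
  induction row with
  | nil =>
    intro s ws hnn
    rw [pvPadB_nil]
    have hlen : ws.length - s = (ws.drop s).length := by simp
    rw [hlen, zipWith_max_replicate _ (fun x hx => hnn x (List.mem_of_mem_drop hx))]
    simp [PySem.List.enumerate]
  | cons c rest ih =>
    intro s ws hnn
    have henum : PySem.List.enumerate (c :: rest) (s : Int)
        = ((s : Int), c) :: PySem.List.enumerate rest ((s : Int) + 1) := by
      simp [PySem.List.enumerate]
    rw [henum, List.foldl_cons]
    have hcast : ((s : Int) + 1) = ((s + 1 : Nat) : Int) := by omega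
    by_cases hs : s < ws.length
    · have hstep : pvStepA ws ((s : Int), c) = ws.set s (max ws[s] (PySem.Chars.len c)) := by
        simp [pvStepA, hs]
      rw [hstep, hcast, ih (s + 1) _ ?nn]
      case nn =>
        intro x hx
        rcases List.mem_or_eq_of_mem_set hx with h | rfl
        · exact hnn x h
        · exact le_max_of_le_right (chars_len_nonneg c)
      have hlen : (ws.set s (max ws[s] (PySem.Chars.len c))).length = ws.length := by simp
      rw [List.drop_set_of_lt (by omega : s < s + 1), hlen]
      have htake : (ws.set s (max ws[s] (PySem.Chars.len c))).take (s + 1)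
          = ws.take s ++ [max ws[s] (PySem.Chars.len c)] := by
        rw [List.take_add_one, List.take_set_of_le (le_refl s)]
        simp [List.getElem?_set_self', List.getElem?_eq_getElem hs]
      rw [htake]
      have hdrop : ws.drop s = ws[s] :: ws.drop (s + 1) := List.drop_eq_getElem_cons hs
      rw [hdrop, pvPadB_cons _ (by omega), List.zipWith_cons_cons]
      have : ws.length - s - 1 = ws.length - (s + 1) := by omega
      rw [this]
      simp
    · have hstep : pvStepA ws ((s : Int), c) = ws := by
        simp only [pvStepA, PySem.List.len_eq]
        rw [if_neg (by omega)]
      rw [hstep, hcast, ih (s + 1) _ hnn]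
      have h1 : ws.length - s = 0 := by omega
      have h2 : ws.length - (s + 1) = 0 := by omega
      simp [h1, h2, List.take_of_length_le (by omega : ws.length ≤ s),
        List.take_of_length_le (by omega : ws.length ≤ s + 1),
        List.drop_of_length_le (by omega : ws.length ≤ s),
        List.drop_of_length_le (by omega : ws.length ≤ s + 1), pvPadB]

theorem pvUpdA_eq (ws : List Int) (row : List (List Char)) (hnn : ∀ x ∈ ws, 0 ≤ x) :
    pvUpdA ws row = ws.zipWith (fun w c => max w (PySem.Chars.len c)) (pvPadB ws.length row) := by
  have h := pvUpdA_enum row 0 ws hnn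
  simpa [pvUpdA] using h

theorem foldA_eq (body : List (List (List Char))) : ∀ (ws : List Int), (∀ x ∈ ws, 0 ≤ x) →
    body.foldl pvUpdA ws
      = body.foldl (fun ws row => ws.zipWith (fun w c => max w (PySem.Chars.len c)) (pvPadB ws.length row)) ws := by
  induction body with
  | nil => intro ws _; rfl
  | cons r body ih =>
    intro ws hnn
    simp only [List.foldl_cons]
    rw [pvUpdA_eq ws r hnn]
    apply ih
    intro x hx
    rcases List.mem_iff_getElem.mp hx with ⟨i, hi, rfl⟩
    rw [List.getElem_zipWith]
    exact le_max_of_le_right (chars_len_nonneg _)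

theorem foldZ_length (body : List (List (List Char))) : ∀ (ws : List Int),
    (body.foldl (fun ws row => ws.zipWith (fun w c => max w (PySem.Chars.len c)) (pvPadB ws.length row)) ws).length = ws.length := by
  induction body with
  | nil => intro ws; rfl
  | cons r body ih =>
    intro ws
    simp only [List.foldl_cons]
    rw [ih]
    simp [pvPadB_length]

theorem foldZ_getElem (body : List (List (List Char))) : ∀ (ws : List Int) (i : Nat) (h : i < ws.length),
    (body.foldl (fun ws row => ws.zipWith (fun w c => max w (PySem.Chars.len c)) (pvPadB ws.length row)) ws)[i]'(by rw [foldZ_length]; exact h)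
      = body.foldl (fun a r => max a (PySem.Chars.len ((pvPadB ws.length r).getD i []))) ws[i] := by
  induction body with
  | nil => intro ws i h; rfl
  | cons r body ih =>
    intro ws i h
    simp only [List.foldl_cons]
    have hlen : (ws.zipWith (fun w c => max w (PySem.Chars.len c)) (pvPadB ws.length r)).length = ws.length := by
      simp [pvPadB_length]
    have hzi : i < (ws.zipWith (fun w c => max w (PySem.Chars.len c)) (pvPadB ws.length r)).length := by omega
    rw [ih _ i hzi]
    rw [List.getElem_zipWith]
    congr 1
    · funext a r'
      rw [hlen]
    · rw [List.getD_eq_getElem _ _ (by rw [pvPadB_length]; exact h)]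

theorem widths_eq (header : List (List Char)) (body : List (List (List Char))) :
    body.foldl pvUpdA (header.map (fun h => PySem.Chars.len h))
      = (List.range header.length).map (fun i =>
          (PySem.List.max? ((pvPadB header.length header :: body.map (pvPadB header.length)).map
            (fun r => PySem.Chars.len (r.getD i []))) id).getD 0) := by
  have hnn : ∀ x ∈ header.map (fun h => PySem.Chars.len h), 0 ≤ x := by
    intro x hx
    rcases List.mem_map.mp hx with ⟨c, _, rfl⟩
    exact chars_len_nonneg c
  rw [foldA_eq body _ hnn]
  apply List.ext_getElem
  · rw [foldZ_length]; simp
  · intro i h1 h2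
    have hi : i < header.length := by simpa using h2
    have hiw : i < (header.map (fun h => PySem.Chars.len h)).length := by simpa using hi
    rw [foldZ_getElem body _ i hiw]
    simp only [List.getElem_map, List.getElem_range, List.length_map, List.map_cons,
      List.map_map, max?_cons_int, Option.getD_some, List.foldl_map, Function.comp]
    rw [pvPadB_of_length_eq, List.getD_eq_getElem _ _ hi]

theorem zip_pad (row : List (List Char)) (widths : List Int) (n : Nat) (hw : widths.length = n) :
    (row ++ List.replicate (n - row.length) ([] : List Char)).zip widths
      = (pvPadB n row).zip widths := by
  rw [zip_take_left _ widths, hw, pad_take]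

-- ---- B-side: zip(*cols) as an indexed transpose ----

theorem pvHeads?_of_nonempty {α : Type} (d : α) (cs : List (List α)) (h : ∀ c ∈ cs, c ≠ []) :
    pvHeads? cs = some (cs.map (·.headD d), cs.map (·.tail)) := by
  induction cs with
  | nil => rfl
  | cons c cs ih =>
    have ih' := ih (fun y hy => h y (List.mem_cons_of_mem _ hy))
    obtain ⟨x, xs, rfl⟩ := List.exists_cons_of_ne_nil (h c List.mem_cons_self)
    simp only [pvHeads?, List.foldr_cons] at ih' ⊢
    rw [ih']
    simp

theorem pvZipStarAux_eq {α : Type} (d : α) (c : List α) : ∀ (cs : List (List α)),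
    (∀ y ∈ cs, y.length = c.length) →
    pvZipStarAux c cs = (List.range c.length).map (fun k => (c :: cs).map (fun y => y.getD k d)) := by
  induction c with
  | nil => intro cs _; simp [pvZipStarAux]
  | cons x xs ih =>
    intro cs hlen
    have hne : ∀ y ∈ cs, y ≠ [] := by
      intro y hy hnil
      have := hlen y hy
      simp [hnil] at this
    rw [show pvZipStarAux (x :: xs) cs = (match pvHeads? cs with
        | some (hs, ts) => (x :: hs) :: pvZipStarAux xs ts
        | none => []) from rfl]
    rw [pvHeads?_of_nonempty d cs hne]
    show (x :: cs.map (·.headD d)) :: pvZipStarAux xs (cs.map (·.tail)) = _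
    have htails : ∀ y ∈ cs.map (·.tail), y.length = xs.length := by
      intro y hy
      rcases List.mem_map.mp hy with ⟨z, hz, rfl⟩
      have := hlen z hz
      simp at this ⊢
      omega
    rw [ih (cs.map (·.tail)) htails]
    simp only [List.length_cons, List.range_succ_eq_map, List.map_cons, List.map_map]
    congr 1
    · simp only [List.getD_cons_zero]
      congr 1
      apply List.map_congr_left
      intro y hy
      obtain ⟨z, zs, rfl⟩ := List.exists_cons_of_ne_nil (hne y hy)
      rfl
    · apply List.map_congr_left
      intro k _
      simp only [Function.comp, Nat.succ_eq_add_one, List.getD_cons_succ]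
      congr 1
      apply List.map_congr_left
      intro y hy
      obtain ⟨z, zs, rfl⟩ := List.exists_cons_of_ne_nil (hne y hy)
      rfl

theorem pvZipStar_eq_index {α : Type} (d : α) (m : Nat) (cols : List (List α))
    (hne : cols ≠ []) (hlen : ∀ c ∈ cols, c.length = m) :
    pvZipStar cols = (List.range m).map (fun k => cols.map (fun c => c.getD k d)) := by
  obtain ⟨c, cs, rfl⟩ := List.exists_cons_of_ne_nil hne
  have hc : c.length = m := hlen c List.mem_cons_self
  subst hc
  exact pvZipStarAux_eq d c cs (fun y hy => hlen y (List.mem_cons_of_mem _ hy))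

-- ---- bridging lemmas between the two renderings ----

-- the cleaning function shared by both sides
def pvClean (row : List (Option String)) : List (List Char) :=
  row.map (fun cell => PySem.Chars.strip (cell.getD "").toList)

theorem cellB_eq (i : Nat) (row : List (Option String)) :
    pvCellB i row = (pvClean row).getD i [] := by
  by_cases h : i < row.length
  · have hm : i < (pvClean row).length := by simpa [pvClean] using h
    rw [pvCellB, if_pos (by simp [PySem.List.len_eq]; omega),
      List.getD_eq_getElem _ _ h, List.getD_eq_getElem _ _ hm]
    simp [pvClean]
  · rw [pvCellB, if_neg (by simp [PySem.List.len_eq]; omega)]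
    rw [List.getD_eq_getElem?_getD, List.getElem?_eq_none (by simpa [pvClean] using h)]
    rfl

theorem pad_getD (n i : Nat) (h : i < n) (l : List (List Char)) :
    (pvPadB n l).getD i [] = l.getD i [] := by
  rw [List.getD_eq_getElem _ _ (by rw [pvPadB_length]; exact h)]
  by_cases hl : i < l.length
  · rw [List.getD_eq_getElem _ _ hl]
    simp [pvPadB, List.getElem_take, hl]
  · rw [List.getD_eq_getElem?_getD, List.getElem?_eq_none (by omega)]
    simp only [pvPadB, List.getElem_take]
    rw [List.getElem_append_right (by omega)]
    simp

-- "|" ++ "|".join(" c " pieces) ++ "|"  =  "| " ++ " | ".join(cells) ++ " |"  for ≥ 1 cell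
theorem bracket_join (l : List (List Char)) (h : l ≠ []) :
    ['|'] ++ PySem.Chars.join ['|'] (l.map (fun c => [' '] ++ c ++ [' '])) ++ ['|']
      = ['|', ' '] ++ PySem.Chars.join [' ', '|', ' '] l ++ [' ', '|'] := by
  induction l with
  | nil => exact absurd rfl h
  | cons a l ih =>
    cases l with
    | nil => simp [PySem.Chars.join_singleton]
    | cons b l =>
      have ih' := ih (by simp)
      simp only [List.map_cons, PySem.Chars.join_cons_cons, List.append_assoc, List.cons_append,
        List.nil_append] at ih' ⊢
      have key := congrArg List.tail ih'
      simp only [List.tail_cons] at key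
      simp [key]

-- map over a zip with a range-map as an indexed map
theorem zip_rangeMap {α β γ : Type} (l : List α) (g : Nat → β) (f : α × β → γ) (n : Nat)
    (h : l.length = n) (d : α) :
    (l.zip ((List.range n).map g)).map f = (List.range n).map (fun i => f (l.getD i d, g i)) := by
  apply List.ext_getElem
  · simp [h]
  · intro i h1 h2
    have hi : i < n := by simpa using h2
    simp only [List.getElem_map, List.getElem_zip, List.getElem_range]
    rw [List.getD_eq_getElem _ _ (by omega)]

-- B's column width, as used in the proofs
def pvWB (td : List (List (Option String))) (i : Nat) : Int :=
  (PySem.List.max? ((td.map (pvCellB i)).map PySem.Chars.len) id).getD 0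

theorem colB_len (r : List (Option String)) (t : List (List (Option String))) (i : Nat) :
    (pvColB (r :: t) i).length = t.length + 2 := by
  simp [pvColB]

theorem colB_expand (r : List (Option String)) (t : List (List (Option String))) (i : Nat) :
    pvColB (r :: t) i
      = ([' '] ++ pvLjust (pvCellB i r) (pvWB (r :: t) i) ++ [' '])
        :: List.replicate ((pvWB (r :: t) i) + 2).toNat '-'
        :: t.map (fun row => [' '] ++ pvLjust (pvCellB i row) (pvWB (r :: t) i) ++ [' ']) := by
  simp [pvColB, pvWB, List.map_map, Function.comp]

-- B's width equals A's width formula, column by column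
theorem wB_eq_g (r : List (Option String)) (t : List (List (Option String))) (i : Nat)
    (hi : i < r.length) :
    pvWB (r :: t) i
      = (PySem.List.max? (((pvPadB (pvClean r).length (pvClean r))
            :: (t.map pvClean).map (pvPadB (pvClean r).length)).map
          (fun rr => PySem.Chars.len (rr.getD i []))) id).getD 0 := by
  have hn : (pvClean r).length = r.length := by simp [pvClean]
  have hlist : ((r :: t).map (pvCellB i)).map PySem.Chars.len
      = ((pvPadB (pvClean r).length (pvClean r))
            :: (t.map pvClean).map (pvPadB (pvClean r).length)).map
          (fun rr => PySem.Chars.len (rr.getD i [])) := by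
    simp only [List.map_cons, List.map_map]
    congr 1
    · rw [pvPadB_of_length_eq, ← cellB_eq]
    · apply List.map_congr_left
      intro row _
      simp only [Function.comp_apply]
      rw [pad_getD _ _ (by omega : i < (pvClean r).length), ← cellB_eq]
  unfold pvWB
  rw [hlist]

theorem bracket_join_map {β : Type} (xs : List β) (f : β → List Char) (h : xs ≠ []) :
    ['|'] ++ PySem.Chars.join ['|'] (xs.map (fun x => [' '] ++ f x ++ [' '])) ++ ['|']
      = ['|', ' '] ++ PySem.Chars.join [' ', '|', ' '] (xs.map f) ++ [' ', '|'] := by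
  have hb := bracket_join (xs.map f) (by simpa using h)
  rw [List.map_map] at hb
  simpa [Function.comp] using hb

theorem main_cons (r : List (Option String)) (t : List (List (Option String))) (hr : r ≠ []) :
    convert_to_markdown_table (r :: t) = convert_to_markdown_table_alt (r :: t) := by
  have hn0 : 0 < r.length := List.length_pos_of_ne_nil hr
  unfold convert_to_markdown_table convert_to_markdown_table_alt
  rw [if_neg (by simp : ¬ (r :: t : List (List (Option String))) = []),
      if_neg (by simp [hr] : ¬ ((r :: t : List (List (Option String))) = [] ∨ (r :: t).headD [] = []))]
  simp only [List.map_cons, List.headD_cons]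
  have hclean : ∀ row : List (Option String),
      List.map (fun cell => PySem.Chars.strip ((cell.getD "")).toList) row = pvClean row :=
    fun _ => rfl
  simp only [hclean]
  have hn : (pvClean r).length = r.length := by simp [pvClean]
  have hW := widths_eq (pvClean r) (t.map pvClean)
  have hcolsne : (List.range r.length).map (pvColB (r :: t)) ≠ [] := by
    simp only [ne_eq, List.map_eq_nil_iff, List.range_eq_nil]
    omega
  have hcollen : ∀ c ∈ (List.range r.length).map (pvColB (r :: t)), c.length = t.length + 2 := by
    intro c hc
    rcases List.mem_map.mp hc with ⟨i, _, rfl⟩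
    exact colB_len r t i
  rw [pvZipStar_eq_index ([] : List Char) (t.length + 2) _ hcolsne hcollen]
  congr 1
  congr 1
  apply List.ext_getElem
  · simp
  · intro k h1 h2
    rcases k with _ | k
    · -- header line
      simp only [List.getElem_append, List.getElem_cons_zero, List.getElem_map,
        List.getElem_range, List.map_map]
      rw [dif_pos (by simp)]
      simp only [Function.comp_def, colB_expand, List.getD_cons_zero]
      rw [bracket_join_map (List.range r.length) _ (by simp only [ne_eq, List.range_eq_nil]; omega)]
      congr 1
      simp only [hW, List.map_map]
      rw [zip_rangeMap (pvClean r) _ _ _ rfl []]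
      rw [show List.range (pvClean r).length = List.range r.length from by rw [hn]]
      congr 1
      congr 1
      apply List.map_congr_left
      intro i hi
      have hilt : i < r.length := List.mem_range.mp hi
      rw [← cellB_eq, wB_eq_g r t i hilt]
      simp [List.map_map]
    · rcases k with _ | k
      · -- separator line
        simp only [List.getElem_append, List.getElem_map, List.getElem_range]
        rw [dif_pos (by simp)]
        simp only [Nat.zero_add, List.getElem_cons_succ, List.getElem_cons_zero, List.map_map,
          Function.comp_def, colB_expand, List.getD_cons_succ, List.getD_cons_zero]
        congr 1
        congr 1
        congr 1
        simp only [hW, List.map_map]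
        rw [show List.range (pvClean r).length = List.range r.length from by rw [hn]]
        apply List.map_congr_left
        intro i hi
        rw [wB_eq_g r t i (List.mem_range.mp hi)]
        simp [List.map_map]
      · -- body line k
        have hkt : k < t.length := by simpa using h2
        simp only [List.getElem_append, List.getElem_map, List.getElem_range]
        rw [dif_neg (by simp)]
        have hidx : k + 1 + 1 - 2 = k := by omega
        simp only [List.length_cons, List.length_nil, Nat.reduceAdd, hidx]
        simp only [List.map_map, Function.comp_def, colB_expand, List.getD_cons_succ]
        simp only [List.getD_eq_getElem?_getD, List.getElem?_map, List.getElem?_eq_getElem hkt,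
          Option.map_some, Option.getD_some]
        rw [bracket_join_map (List.range r.length) _ (by simp only [ne_eq, List.range_eq_nil]; omega)]
        congr 1
        congr 1
        congr 1
        rw [zip_pad _ _ (pvClean r).length (by rw [hW]; simp)]
        simp only [hW]
        rw [zip_rangeMap (pvPadB (pvClean r).length (pvClean t[k])) _ _ _ (pvPadB_length _ _) []]
        rw [show List.range (pvClean r).length = List.range r.length from by rw [hn]]
        apply List.map_congr_left
        intro i hi
        have hilt := List.mem_range.mp hi
        rw [pad_getD _ _ (by omega), ← cellB_eq, wB_eq_g r t i hilt]


-- ===== VERDICT (by name: the statements are the Claim_ definitions above) =====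
theorem convert_to_markdown_table_spec : Claim_unchanged_convert_to_markdown_table := by
  intro td _ hD
  cases td with
  | nil => rfl
  | cons r t =>
    have hr : r ≠ [] := fun h => hD ⟨by simp, by simp [h]⟩
    exact main_cons r t hr

theorem convert_to_markdown_table_changed : Claim_changed_convert_to_markdown_table := by
  unfold Claim_changed_convert_to_markdown_table; decide

theorem convert_to_markdown_table_tight : Claim_exact_convert_to_markdown_table := by
  intro td _ hD hEq
  obtain ⟨hne, hhd⟩ := hD
  obtain ⟨r, t, rfl⟩ := List.exists_cons_of_ne_nil hne
  simp only [List.headD_cons] at hhd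
  subst hhd
  unfold convert_to_markdown_table convert_to_markdown_table_alt at hEq
  rw [if_neg (by simp), if_pos (by simp)] at hEq
  simp only [List.map_cons, List.map_nil, List.zip_nil_left, PySem.Chars.join_nil,
    List.append_nil, List.nil_append, List.cons_append] at hEq
  have h2 := congrArg String.toList hEq
  simp [PySem.Chars.join_cons_cons] at h2
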